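-- pv_equiv track=rewrite | github.com/switchbox-data/rate-design-platform | utils/eia_region_config.py | get_utility_zone_mapping_for_state
-- ===== SOURCE A (Python) =====
-- UTILITY_SERVICE_AREAS: dict[str, list[dict[str, object]]] = {
--     "nyseg": [
--         {"state": "NY", "zones": ["A", "C", "D", "E", "F", "G", "H"]},
--     ],
--     "rge": [
--         {"state": "NY", "zones": ["B"]},
--     ],
--     "cenhud": [
--         {"state": "NY", "zones": ["G"]},
--     ],
--     "nimo": [
--         {"state": "NY", "zones": ["A", "B", "C", "D", "E", "F"]},
--     ],
--     "rie": [
--         {"state": "RI", "zones": ["RI"]},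
--     ],
-- }
--
-- def get_utility_zone_mapping_for_state(state: str) -> dict[str, list[str]]:
--     """Return utility->zones mapping for a specific state."""
--     state_upper = state.upper()
--     utility_zone_mapping: dict[str, list[str]] = {}
--
--     for utility, service_areas in UTILITY_SERVICE_AREAS.items():
--         for area in service_areas:
--             area_state = str(area["state"]).upper()
--             if area_state == state_upper:
--                 utility_zone_mapping[utility] = list(area["zones"])  # copy
--                 break
--
--     return utility_zone_mapping
-- ===== SOURCE B (Python) =====
-- UTILITY_SERVICE_AREAS: dict[str, list[dict[str, object]]] = {
--     "nyseg": [
--         {"state": "NY", "zones": ["A", "C", "D", "E", "F", "G", "H"]},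
--     ],
--     "rge": [
--         {"state": "NY", "zones": ["B"]},
--     ],
--     "cenhud": [
--         {"state": "NY", "zones": ["G"]},
--     ],
--     "nimo": [
--         {"state": "NY", "zones": ["A", "B", "C", "D", "E", "F"]},
--     ],
--     "rie": [
--         {"state": "RI", "zones": ["RI"]},
--     ],
-- }
--
-- # Inverted index built once at module load: uppercased state -> {utility: zones},
-- # keeping only the FIRST area per utility for each state (mirrors A's `break`).
-- STATE_INDEX: dict[str, dict[str, list[str]]] = {}
-- for _utility, _service_areas in UTILITY_SERVICE_AREAS.items():
--     for _area in _service_areas: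
--         _st = str(_area["state"]).upper()
--         _bucket = STATE_INDEX.setdefault(_st, {})
--         if _utility not in _bucket:
--             _bucket[_utility] = _area["zones"]
--
--
-- def get_utility_zone_mapping_for_state(state: str) -> dict[str, list[str]]:
--     """Return utility->zones mapping for a specific state."""
--     return {u: list(z) for u, z in STATE_INDEX.get(state.upper(), {}).items()}
-- ===== Notes on version B (the rewrite author's own statement) =====
-- stated objective: idiomatic
-- what changed: Replaces the per-call nested scan over UTILITY_SERVICE_AREAS with a module-load inverted index STATE_INDEX (uppercased state -> {utility: zones}, first matching area per utility), so the function is a single dict lookup plus a copying comprehension.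
import Mathlib
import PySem

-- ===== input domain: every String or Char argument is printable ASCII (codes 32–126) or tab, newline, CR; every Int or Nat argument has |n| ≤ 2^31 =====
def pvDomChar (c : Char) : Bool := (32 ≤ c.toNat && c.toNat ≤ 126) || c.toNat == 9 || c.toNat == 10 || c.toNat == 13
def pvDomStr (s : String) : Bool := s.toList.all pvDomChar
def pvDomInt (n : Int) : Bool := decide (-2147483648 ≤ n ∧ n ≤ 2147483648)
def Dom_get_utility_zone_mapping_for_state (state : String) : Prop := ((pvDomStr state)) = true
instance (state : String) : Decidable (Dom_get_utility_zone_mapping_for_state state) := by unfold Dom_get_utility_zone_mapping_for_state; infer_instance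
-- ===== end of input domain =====

-- B replaces A's per-call nested scan with a once-built inverted index (state -> {utility: zones}) and a single lookup (idiomatic; return-value equivalence).


-- ===== PORT A =====
-- UTILITY_SERVICE_AREAS: each area dict {"state": st, "zones": zs} is the pair (st, zs)
def pvAreas : List (String × List (String × List String)) :=
  [("nyseg", [("NY", ["A","C","D","E","F","G","H"])]),
   ("rge",   [("NY", ["B"])]),
   ("cenhud",[("NY", ["G"])]),
   ("nimo",  [("NY", ["A","B","C","D","E","F"])]),
   ("rie",   [("RI", ["RI"])])]

-- inner 'for area in service_areas: … break': zones of the first area matching state_upper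
def pvFirstMatch (su : String) : List (String × List String) → Option (List String)
  | [] => none
  | (st, zones) :: rest =>
      if PySem.Str.upper st == su then some zones else pvFirstMatch su rest

def get_utility_zone_mapping_for_state (state : String) : List (String × List String) :=
  let state_upper := PySem.Str.upper state
  (pvAreas.foldl (fun (d : PySem.Dict String (List String)) p =>
      match pvFirstMatch state_upper p.2 with
      | some zs => d.insert p.1 zs
      | none => d) PySem.Dict.empty).items

-- ===== PORT B =====
-- module-load loop building STATE_INDEX: uppercased state -> {utility: zones} (first area per utility)
def pvStateIndex : PySem.Dict String (PySem.Dict String (List String)) :=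
  pvAreas.foldl (fun idx p =>
    p.2.foldl (fun idx area =>
      let st := PySem.Str.upper area.1
      let idx' := idx.setdefault st PySem.Dict.empty
      let bucket := idx'.getD st PySem.Dict.empty
      if bucket.contains p.1 then idx' else idx'.insert st (bucket.insert p.1 area.2)) idx)
    PySem.Dict.empty

def get_utility_zone_mapping_for_state_alt (state : String) : List (String × List String) :=
  ((pvStateIndex.getD (PySem.Str.upper state) PySem.Dict.empty).items).map (fun p => (p.1, p.2))

-- ===== PRECONDITION & SPEC =====
def Spec_get_utility_zone_mapping_for_state (state : String) (out : List (String × List String)) : Prop := out = get_utility_zone_mapping_for_state_alt state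
instance (state : String) (out : List (String × List String)) : Decidable (Spec_get_utility_zone_mapping_for_state state out) := by unfold Spec_get_utility_zone_mapping_for_state; infer_instance

-- ===== CLAIM (what is proved, stated in full; the proofs are below) =====
def Claim_equal_get_utility_zone_mapping_for_state : Prop := ∀ (state : String), Dom_get_utility_zone_mapping_for_state state → Spec_get_utility_zone_mapping_for_state state (get_utility_zone_mapping_for_state state)

-- ===== LEMMAS AND PROOFS =====
-- both programs depend on state only through state.upper(); agreement for every key
theorem pv_key (su : String) :
    (pvAreas.foldl (fun (d : PySem.Dict String (List String)) p =>
        match pvFirstMatch su p.2 with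
        | some zs => d.insert p.1 zs
        | none => d) PySem.Dict.empty).items =
    ((pvStateIndex.getD su PySem.Dict.empty).items).map (fun p => (p.1, p.2)) := by
  by_cases h1 : su = "NY"
  · subst h1; rfl
  · by_cases h2 : su = "RI"
    · subst h2; rfl
    · have hNY : PySem.Str.upper "NY" = "NY" := by decide
      have hRI : PySem.Str.upper "RI" = "RI" := by decide
      have e1 : ("NY" == su) = false := by
        simp only [beq_eq_false_iff_ne, ne_eq]; exact fun h => h1 h.symm
      have e2 : ("RI" == su) = false := by
        simp only [beq_eq_false_iff_ne, ne_eq]; exact fun h => h2 h.symm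
      have hidx : pvStateIndex = PySem.Dict.mk
          [("NY", PySem.Dict.mk [("nyseg", ["A","C","D","E","F","G","H"]), ("rge", ["B"]),
                                 ("cenhud", ["G"]), ("nimo", ["A","B","C","D","E","F"])]),
           ("RI", PySem.Dict.mk [("rie", ["RI"])])] := by decide
      simp [pvAreas, pvFirstMatch, hNY, hRI, e1, e2, hidx,
            PySem.Dict.getD_eq_get?_getD, PySem.Dict.empty, PySem.Dict.get?]

-- ===== VERDICT (by name: the statement is the Claim_ definition above) =====
theorem get_utility_zone_mapping_for_state_spec : Claim_equal_get_utility_zone_mapping_for_state := by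
  intro state _
  show _ = _
  unfold get_utility_zone_mapping_for_state get_utility_zone_mapping_for_state_alt
  exact pv_key (PySem.Str.upper state)
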